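-- pv_equiv track=rewrite | github.com/RuanVitorr/atividades-de-Computabilidade-e-Complexidade-de-Algortimos | att05.py | valida_string_binaria
-- ===== SOURCE A (Python) =====
-- def valida_string_binaria(palavra):
--     if not palavra:
--         return 'palavra invalida (vazia)'
--
--     estado = 'q0'
--
--     for char in palavra:
--         if estado == 'q0':
--             if char == '0':
--                 estado = 'q1'
--             elif char == '1':
--                 estado = 'q2'
--             else:
--                 return 'palavra invalida (caractere inválido)'
--
--         elif estado == 'q1':
--             if char == '0':
--                 estado = 'q1'
--             elif char == '1':
--                 estado = 'q3'
--             else: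
--                 return 'palavra invalida (caractere inválido)'
--
--         elif estado == 'q2':
--             if char == '1':
--                 estado = 'q2'
--             elif char == '0':
--                 estado = 'q3'
--             else:
--                 return 'palavra invalida (caractere inválido)'
--
--         elif estado == 'q3':
--             if char == '0' or char == '1':
--                 estado = 'q3'
--             else:
--                 return 'palavra invalida (caractere inválido)'
--
--     if estado in ['q1', 'q2', 'q3']:
--         return "palavra valida (começa e termina com o mesmo caractere)"
--     else:
--         return "palavra invalida (não atende aos critérios)"
-- ===== SOURCE B (Python) =====
-- def valida_string_binaria(palavra):
--     if not palavra:
--         return 'palavra invalida (vazia)'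
--     if set(palavra) <= {'0', '1'}:
--         return "palavra valida (começa e termina com o mesmo caractere)"
--     return 'palavra invalida (caractere inválido)'
-- ===== Notes on version B (the rewrite author's own statement) =====
-- stated objective: simpler
-- what changed: Replaced the 4-state DFA character-by-character simulation by a set-based check: the distinct characters of the word are collected once into a set and tested for subset of {'0','1'}; no state machine, no per-character branching, and the DFA's unreachable 'nao atende aos criterios' branch disappears.
import Mathlib
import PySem

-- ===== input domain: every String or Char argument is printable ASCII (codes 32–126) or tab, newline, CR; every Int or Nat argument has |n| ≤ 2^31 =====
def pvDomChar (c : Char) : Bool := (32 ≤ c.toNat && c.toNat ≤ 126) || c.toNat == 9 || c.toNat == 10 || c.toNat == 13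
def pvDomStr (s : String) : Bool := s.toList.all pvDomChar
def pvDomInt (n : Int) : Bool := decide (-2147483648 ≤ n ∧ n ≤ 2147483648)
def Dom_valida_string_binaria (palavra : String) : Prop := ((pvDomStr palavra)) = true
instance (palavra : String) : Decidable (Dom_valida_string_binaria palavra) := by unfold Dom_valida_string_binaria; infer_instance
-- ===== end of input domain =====

-- B replaces A's 4-state DFA loop by a once-built set of distinct characters tested for subset of {'0','1'} (objective: simpler).

-- ===== PORT A =====
-- literal transliteration of A's for-loop with its early returns, state threaded through
def validaLoopA : List Char → String → String
  | [], estado =>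
      if estado = "q1" ∨ estado = "q2" ∨ estado = "q3" then
        "palavra valida (começa e termina com o mesmo caractere)"
      else
        "palavra invalida (não atende aos critérios)"
  | c :: rest, estado =>
      if estado = "q0" then
        if c = '0' then validaLoopA rest "q1"
        else if c = '1' then validaLoopA rest "q2"
        else "palavra invalida (caractere inválido)"
      else if estado = "q1" then
        if c = '0' then validaLoopA rest "q1"
        else if c = '1' then validaLoopA rest "q3"
        else "palavra invalida (caractere inválido)"
      else if estado = "q2" then
        if c = '1' then validaLoopA rest "q2"
        else if c = '0' then validaLoopA rest "q3"
        else "palavra invalida (caractere inválido)"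
      else if estado = "q3" then
        if c = '0' ∨ c = '1' then validaLoopA rest "q3"
        else "palavra invalida (caractere inválido)"
      else
        validaLoopA rest estado

def valida_string_binaria (palavra : String) : String :=
  if palavra.toList = [] then "palavra invalida (vazia)"
  else validaLoopA palavra.toList "q0"

-- ===== PORT B =====
-- set(palavra) <= {'0','1'}, via PySem.Set (distinct characters, built once)
def valida_string_binaria_alt (palavra : String) : String :=
  if palavra.toList = [] then "palavra invalida (vazia)"
  else if PySem.Set.issubset (PySem.Set.ofList palavra.toList) (PySem.Set.ofList ['0', '1']) then
    "palavra valida (começa e termina com o mesmo caractere)"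
  else "palavra invalida (caractere inválido)"

-- ===== PRECONDITION & SPEC =====
def Spec_valida_string_binaria (palavra : String) (out : String) : Prop := out = valida_string_binaria_alt palavra
instance (palavra : String) (out : String) : Decidable (Spec_valida_string_binaria palavra out) := by unfold Spec_valida_string_binaria; infer_instance

-- ===== CLAIM =====
def Claim_equal_valida_string_binaria : Prop := ∀ (palavra : String), Dom_valida_string_binaria palavra → Spec_valida_string_binaria palavra (valida_string_binaria palavra)

-- ===== LEMMAS AND PROOFS =====

-- B's set-subset test agrees with "every character is '0' or '1'"
theorem issubset_eq_all (xs : List Char) :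
    PySem.Set.issubset (PySem.Set.ofList xs) (PySem.Set.ofList ['0', '1'])
      = xs.all (fun c => c == '0' || c == '1') := by
  by_cases h : ∀ c ∈ xs, c = '0' ∨ c = '1'
  · have h1 : PySem.Set.issubset (PySem.Set.ofList xs) (PySem.Set.ofList ['0', '1']) = true := by
      rw [PySem.Set.issubset_iff]
      intro x hx
      rcases h x (by simpa [PySem.Set.mem_ofList] using hx) with h' | h' <;> simp [h', PySem.Set.ofList]
    have h2 : xs.all (fun c => c == '0' || c == '1') = true := by
      simp only [List.all_eq_true]
      intro c hc
      rcases h c hc with h' | h' <;> simp [h']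
    rw [h1, h2]
  · push Not at h
    obtain ⟨c, hc, h0, h1⟩ := h
    have h2 : xs.all (fun c => c == '0' || c == '1') = false := by
      simp only [List.all_eq_false]
      exact ⟨c, hc, by simp [h0, h1]⟩
    have h3 : PySem.Set.issubset (PySem.Set.ofList xs) (PySem.Set.ofList ['0', '1']) = false := by
      rw [Bool.eq_false_iff]
      intro hs
      have := (PySem.Set.issubset_iff _ _).mp hs c (by simp [PySem.Set.mem_ofList, hc])
      simp [PySem.Set.ofList] at this
      rcases this with h' | h' <;> [exact h0 h'; exact h1 h']
    rw [h2, h3]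

-- from any accepting state, A's loop accepts iff every remaining char is binary
theorem validaLoopA_accepting (rest : List Char) (estado : String)
    (h : estado = "q1" ∨ estado = "q2" ∨ estado = "q3") :
    validaLoopA rest estado =
      (if rest.all (fun c => c == '0' || c == '1') then
        "palavra valida (começa e termina com o mesmo caractere)"
      else "palavra invalida (caractere inválido)") := by
  induction rest generalizing estado with
  | nil =>
      rcases h with h | h | h <;> subst h <;> simp [validaLoopA]
  | cons c rest ih =>
      rcases h with h | h | h <;> subst h <;>
        by_cases h0 : c = '0' <;> by_cases h1 : c = '1' <;>
          simp [validaLoopA, h0, h1, ih, List.all_cons]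

theorem valida_string_binaria_eq (palavra : String) :
    valida_string_binaria palavra = valida_string_binaria_alt palavra := by
  unfold valida_string_binaria valida_string_binaria_alt
  by_cases hnil : palavra.toList = []
  · simp [hnil]
  · simp only [if_neg hnil, issubset_eq_all]
    obtain ⟨c, rest, hcr⟩ := List.exists_cons_of_ne_nil hnil
    rw [hcr]
    by_cases h0 : c = '0' <;> by_cases h1 : c = '1' <;>
      simp [validaLoopA, h0, h1, validaLoopA_accepting, List.all_cons]

-- ===== VERDICT =====
theorem valida_string_binaria_spec : Claim_equal_valida_string_binaria := by
  intro palavra _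
  exact valida_string_binaria_eq palavra
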